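-- pv_equiv track=rewrite | github.com/briemadu/restart-inc-ambiguities | analysis_meaning/utils.py | detect_added_positions
-- ===== SOURCE A (Python) =====
-- from typing import List, Union
--
-- def detect_added_positions(shorter_sent: List[str], longer_sent: List[str]):
--     """Return positions that differ in long wrt short sentence."""
--     added = []
--     enumerated = list(enumerate(longer_sent))
--     for position, token in enumerate(shorter_sent):
--         while token != enumerated[position][1]:
--             added.append(enumerated[position][0])
--             enumerated.pop(position)
--     return added
-- ===== SOURCE B (Python) =====
-- def detect_added_positions(shorter_sent, longer_sent):
--     """Return positions that differ in long wrt short sentence."""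
--     added = []
--     j = 0
--     for token in shorter_sent:
--         while longer_sent[j] != token:
--             added.append(j)
--             j += 1
--         j += 1
--     return added
-- ===== Notes on version B (the rewrite author's own statement) =====
-- stated objective: alternative
-- what changed: Replaced the copied enumerate list with repeated mid-list pops (worst-case O(n^2)) by a single two-pointer scan over the longer sentence that appends skipped indices directly; measured only ~1.5x on the generated inputs, so no speed is claimed.
import Mathlib
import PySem

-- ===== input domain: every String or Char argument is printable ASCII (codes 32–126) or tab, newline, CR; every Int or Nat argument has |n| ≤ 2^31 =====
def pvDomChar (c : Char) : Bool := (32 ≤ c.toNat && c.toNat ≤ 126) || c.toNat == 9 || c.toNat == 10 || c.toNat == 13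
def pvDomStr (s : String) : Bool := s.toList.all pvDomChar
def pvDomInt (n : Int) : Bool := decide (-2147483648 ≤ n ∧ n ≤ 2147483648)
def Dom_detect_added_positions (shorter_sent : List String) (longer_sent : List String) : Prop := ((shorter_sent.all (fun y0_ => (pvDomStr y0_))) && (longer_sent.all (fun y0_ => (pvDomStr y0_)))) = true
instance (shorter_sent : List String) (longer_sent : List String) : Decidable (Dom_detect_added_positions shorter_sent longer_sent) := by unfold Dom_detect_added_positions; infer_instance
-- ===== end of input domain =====

-- B replaces A's repeated mid-list pops on a copied enumerate list by a single two-pointer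
-- scan appending skipped indices directly; equal return value on all of Pre_.

-- ===== PORT A =====
-- inner 'while token != enumerated[position][1]: added.append(enumerated[position][0]); enumerated.pop(position)'
-- pyGet?/pop? return none exactly where Python raises IndexError (excluded by Pre_); the port stops there.
def pvInnerA (token : String) (pos : Int) (added : List Int) (enumerated : List (Int × String)) : List Int × List (Int × String) :=
  match PySem.List.pyGet? enumerated pos with
  | none => (added, enumerated)   -- IndexError in Python; outside Pre_
  | some (i, t) =>
    if t == token then (added, enumerated)
    else
      match h : PySem.List.pop? enumerated pos with
      | none => (added, enumerated)   -- unreachable (same index as the read above)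
      | some (_, rest) => pvInnerA token pos (added ++ [i]) rest
termination_by enumerated.length
decreasing_by
  have h2 := PySem.List.length_of_pop?_eq_some _ h
  simp at h2 ⊢
  omega

-- 'for position, token in enumerate(shorter_sent): <inner while>'
def pvOuterA : List String → Int → (List Int × List (Int × String)) → List Int
  | [], _, st => st.1
  | token :: rest, pos, st => pvOuterA rest (pos + 1) (pvInnerA token pos st.1 st.2)

def detect_added_positions (shorter_sent : List String) (longer_sent : List String) : List Int :=
  pvOuterA shorter_sent 0 ([], PySem.List.enumerate longer_sent 0)

-- ===== PORT B =====
-- two-pointer scan: j is the current index into longer_sent; skipped indices are appended directly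
def pvAltGo : List String → List String → Int → List Int → List Int
  | [], _, _, acc => acc
  | _ :: _, [], _, acc => acc   -- IndexError in Python; outside Pre_
  | t :: ts, x :: xs, j, acc =>
    if x == t then pvAltGo ts xs (j + 1) acc
    else pvAltGo (t :: ts) xs (j + 1) (acc ++ [j])

def detect_added_positions_alt (shorter_sent : List String) (longer_sent : List String) : List Int :=
  pvAltGo shorter_sent longer_sent 0 []

-- ===== PRECONDITION & SPEC =====
-- Pre_ excludes exactly the inputs where Python A raises IndexError (shorter_sent is not a
-- subsequence of longer_sent); Python B raises IndexError on exactly the same inputs.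
def Pre_detect_added_positions (shorter_sent : List String) (longer_sent : List String) : Prop :=
  shorter_sent.Sublist longer_sent
instance (shorter_sent : List String) (longer_sent : List String) : Decidable (Pre_detect_added_positions shorter_sent longer_sent) := by unfold Pre_detect_added_positions; infer_instance
def pvWitness_detect_added_positions : List String × List String := (["a", "c"], ["a", "b", "c", "d"])

def Spec_detect_added_positions (shorter_sent : List String) (longer_sent : List String) (out : List Int) : Prop := out = detect_added_positions_alt shorter_sent longer_sent
instance (shorter_sent : List String) (longer_sent : List String) (out : List Int) : Decidable (Spec_detect_added_positions shorter_sent longer_sent out) := by unfold Spec_detect_added_positions; infer_instance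

-- ===== CLAIM (what is proved, stated in full; the proofs are below) =====
def Claim_equal_detect_added_positions : Prop := ∀ (shorter_sent : List String) (longer_sent : List String), Dom_detect_added_positions shorter_sent longer_sent → Pre_detect_added_positions shorter_sent longer_sent → Spec_detect_added_positions shorter_sent longer_sent (detect_added_positions shorter_sent longer_sent)

-- ===== LEMMAS AND PROOFS =====

theorem pvInnerA_none (t : String) (pos : Int) (a : List Int) (e : List (Int × String))
    (h : PySem.List.pyGet? e pos = none) : pvInnerA t pos a e = (a, e) := by
  rw [pvInnerA.eq_def, h]

theorem pvInnerA_stop (t : String) (pos : Int) (a : List Int) (e : List (Int × String))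
    (i : Int) (tok : String) (h : PySem.List.pyGet? e pos = some (i, tok))
    (ht : (tok == t) = true) : pvInnerA t pos a e = (a, e) := by
  rw [pvInnerA.eq_def, h]
  simp [ht]

theorem pvInnerA_step (t : String) (pos : Int) (a : List Int) (e : List (Int × String))
    (i : Int) (tok : String) (y : Int × String) (rest : List (Int × String))
    (h : PySem.List.pyGet? e pos = some (i, tok)) (ht : (tok == t) = false)
    (hp : PySem.List.pop? e pos = some (y, rest)) :
    pvInnerA t pos a e = pvInnerA t pos (a ++ [i]) rest := by
  rw [pvInnerA.eq_def, h]
  simp only [ht, Bool.false_eq_true, if_false]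
  split
  · rename_i heq; rw [hp] at heq; cases heq
  · rename_i y' rest' heq; rw [hp] at heq; cases heq; rfl

-- once the position counter has passed the end of 'enumerated', every inner loop is a no-op
theorem pvOuterA_dead (s : List String) : ∀ (pos : Int) (acc : List Int) (pre : List (Int × String)),
    (pre.length : Int) ≤ pos → pvOuterA s pos (acc, pre) = acc := by
  induction s with
  | nil => intro pos acc pre _; rfl
  | cons t ts ih =>
    intro pos acc pre hle
    have hnone : PySem.List.pyGet? pre pos = none := by
      rw [PySem.List.pyGet?_eq_none_iff]
      intro ⟨_, h2⟩; omega
    simp only [pvOuterA]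
    rw [pvInnerA_none t pos acc pre hnone]
    exact ih (pos + 1) acc pre (by omega)

theorem pvEraseIdx_append (pre : List (Int × String)) (y : Int × String) (rest : List (Int × String)) :
    (pre ++ y :: rest).eraseIdx pre.length = pre ++ rest := by
  induction pre with
  | nil => rfl
  | cons p ps ih => simpa [List.eraseIdx] using ih

theorem pvMain (s : List String) : ∀ (rest : List String) (pre : List (Int × String)) (j : Int) (acc : List Int),
    pvOuterA s (pre.length : Int) (acc, pre ++ PySem.List.enumerate rest j) = pvAltGo s rest j acc := by
  induction s with
  | nil => intro rest pre j acc; simp [pvOuterA, pvAltGo]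
  | cons t ts ihOut =>
    intro rest
    induction rest with
    | nil =>
      intro pre j acc
      have hnone : PySem.List.pyGet? (pre ++ PySem.List.enumerate ([] : List String) j) (pre.length : Int) = none := by
        rw [PySem.List.pyGet?_eq_none_iff]
        intro ⟨_, h2⟩
        simp [PySem.List.enumerate] at h2
      simp only [pvOuterA, pvAltGo]
      rw [pvInnerA_none _ _ _ _ hnone]
      exact pvOuterA_dead ts _ acc _ (by simp [PySem.List.enumerate])
    | cons x xs ihIn =>
      intro pre j acc
      rw [PySem.List.enumerate_cons]
      have hget : PySem.List.pyGet? (pre ++ (j, x) :: PySem.List.enumerate xs (j + 1)) (pre.length : Int) = some (j, x) :=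
        PySem.List.pyGet?_append_length ..
      by_cases hx : x = t
      · subst hx
        simp only [pvOuterA]
        rw [pvInnerA_stop _ _ _ _ _ _ hget (by simp)]
        have hthis := ihOut xs (pre ++ [(j, x)]) (j + 1) acc
        simp only [List.length_append, List.length_cons, List.length_nil, Nat.cast_add,
          Nat.cast_one, Nat.cast_zero, zero_add, List.append_assoc, List.cons_append,
          List.nil_append] at hthis
        rw [hthis]
        simp [pvAltGo]
      · have hbeq : (x == t) = false := by simp [hx]
        have hlt : pre.length < (pre ++ (j, x) :: PySem.List.enumerate xs (j + 1)).length := by simp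
        have hpop := PySem.List.pop?_natCast (pre ++ (j, x) :: PySem.List.enumerate xs (j + 1)) pre.length hlt
        rw [pvEraseIdx_append] at hpop
        simp only [pvOuterA]
        rw [pvInnerA_step _ _ _ _ _ _ _ _ hget hbeq hpop]
        have hthis := ihIn pre (j + 1) (acc ++ [j])
        simp only [pvOuterA] at hthis
        rw [hthis]
        simp [pvAltGo, hbeq]

-- ===== VERDICT (by name: the statement is the Claim_ definition above) =====
theorem detect_added_positions_spec : Claim_equal_detect_added_positions := by
  intro s l _ _
  show detect_added_positions s l = detect_added_positions_alt s l
  have h := pvMain s l ([] : List (Int × String)) 0 []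
  simpa [detect_added_positions, detect_added_positions_alt] using h
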